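-- pv_equiv track=rewrite | github.com/MatanSheffer/similarity_old | kfc-id-detection-functions.py | uniqe_apps
-- ===== SOURCE A (Python) =====
-- def uniqe_apps(kfc,ws):
--
--   if len(ws) == 0 or len(kfc) == 0:
--     return 0,len(ws)+len(kfc)
--
--   kfc_uniqe = [ s[0].split("_")[1] for s in kfc]
--   ws_uniqe = [ s[0].split("_")[1] for s in ws]
--
--   uniqe_set = set(kfc_uniqe)&set(ws_uniqe)
--   dif = set(kfc_uniqe + ws_uniqe) - uniqe_set
--
--   return len(uniqe_set), len(dif)
-- ===== SOURCE B (Python) =====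
-- def uniqe_apps(kfc, ws):
--     if len(ws) == 0 or len(kfc) == 0:
--         return 0, len(ws) + len(kfc)
--     flags = {}
--     for s in kfc:
--         k = s[0].split("_")[1]
--         flags[k] = flags.get(k, 0) | 1
--     for s in ws:
--         k = s[0].split("_")[1]
--         flags[k] = flags.get(k, 0) | 2
--     shared = 0
--     single = 0
--     for f in flags.values():
--         if f == 3:
--             shared += 1
--         else:
--             single += 1
--     return shared, single
-- ===== Notes on version B (the rewrite author's own statement) =====
-- stated objective: alternative
-- what changed: Replaces the set intersection / union-minus-intersection algebra by one membership-flag dict: each split id is mapped to a bitmask of the sides it appeared on, and one final pass over the dict values classifies each id as shared (flag 3) or one-sided.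
import Mathlib
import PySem

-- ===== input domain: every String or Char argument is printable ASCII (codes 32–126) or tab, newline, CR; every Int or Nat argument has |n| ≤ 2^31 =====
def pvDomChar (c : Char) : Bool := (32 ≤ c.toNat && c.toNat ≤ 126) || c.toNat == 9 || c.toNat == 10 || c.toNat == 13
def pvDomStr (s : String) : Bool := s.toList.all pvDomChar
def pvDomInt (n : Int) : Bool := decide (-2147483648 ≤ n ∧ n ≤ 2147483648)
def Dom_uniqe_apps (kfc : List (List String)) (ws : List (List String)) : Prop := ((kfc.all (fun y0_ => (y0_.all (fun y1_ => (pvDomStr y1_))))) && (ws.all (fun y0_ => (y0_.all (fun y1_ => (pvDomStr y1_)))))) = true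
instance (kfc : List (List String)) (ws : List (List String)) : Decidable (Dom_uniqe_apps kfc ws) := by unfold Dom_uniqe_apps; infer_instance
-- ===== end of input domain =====

-- B replaces the set intersection/symmetric-difference algebra by a single membership-flag
-- dict (id -> bitmask of sides) classified in one final pass; objective: alternative.


-- ===== PORT A =====
-- s[0].split("_")[1]  (the defaults are unreachable inside Pre_, which demands s ≠ [] and '_' ∈ s[0])
def pvKey (s : List String) : String :=
  PySem.List.pyGetD ((PySem.Str.split? (PySem.List.pyGetD s 0 "") "_").getD []) 1 ""

def uniqe_apps (kfc : List (List String)) (ws : List (List String)) : Int × Int :=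
  if ws.length = 0 ∨ kfc.length = 0 then (0, ((ws.length + kfc.length : Nat) : Int))
  else
    let kfc_uniqe := kfc.map pvKey
    let ws_uniqe := ws.map pvKey
    let uniqe_set := PySem.Set.inter (PySem.Set.ofList kfc_uniqe) (PySem.Set.ofList ws_uniqe)
    let dif := PySem.Set.diff (PySem.Set.ofList (kfc_uniqe ++ ws_uniqe)) uniqe_set
    (PySem.Set.len uniqe_set, PySem.Set.len dif)

-- ===== PORT B =====
def uniqe_apps_alt (kfc : List (List String)) (ws : List (List String)) : Int × Int :=
  if ws.length = 0 ∨ kfc.length = 0 then (0, ((ws.length + kfc.length : Nat) : Int))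
  else
    let d1 := kfc.foldl (fun d s => d.modify (pvKey s) 0 (fun v => PySem.Int.bor v 1)) PySem.Dict.empty
    let d2 := ws.foldl (fun d s => d.modify (pvKey s) 0 (fun v => PySem.Int.bor v 2)) d1
    d2.values.foldl (fun p f => if f = 3 then (p.1 + 1, p.2) else (p.1, p.2 + 1)) (0, 0)

-- ===== PRECONDITION & SPEC =====
-- Pre_ excludes exactly the inputs on which A raises IndexError: both lists nonempty and
-- some row is empty (s[0]) or its first string has no '_' (split("_")[1]).
def Pre_uniqe_apps (kfc : List (List String)) (ws : List (List String)) : Prop :=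
  ws = [] ∨ kfc = [] ∨ (∀ s ∈ kfc ++ ws, s ≠ [] ∧ '_' ∈ (s.headD "").toList)
instance (kfc : List (List String)) (ws : List (List String)) : Decidable (Pre_uniqe_apps kfc ws) := by unfold Pre_uniqe_apps; infer_instance

def pvWitness_uniqe_apps : List (List String) × List (List String) := ([["app_1", "x"], ["app_2"]], [["app_1"]])

def Spec_uniqe_apps (kfc : List (List String)) (ws : List (List String)) (out : Int × Int) : Prop := out = uniqe_apps_alt kfc ws
instance (kfc : List (List String)) (ws : List (List String)) (out : Int × Int) : Decidable (Spec_uniqe_apps kfc ws out) := by unfold Spec_uniqe_apps; infer_instance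

-- ===== CLAIM (what is proved, stated in full; the proofs are below) =====
def Claim_equal_uniqe_apps : Prop := ∀ (kfc : List (List String)) (ws : List (List String)), Dom_uniqe_apps kfc ws → Pre_uniqe_apps kfc ws → Spec_uniqe_apps kfc ws (uniqe_apps kfc ws)

-- ===== LEMMAS AND PROOFS =====

-- one modify-loop with an idempotent update on the values it can produce
theorem pv_getD_foldl_modify (f : Int → Int) (P : Int → Prop)
    (hPf : ∀ v, P v → P (f v)) (hidem : ∀ v, P v → f (f v) = f v)
    (l : List (List String)) (d : PySem.Dict String Int)
    (hd : ∀ k, P (d.getD k 0)) (k : String) :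
    (l.foldl (fun d s => d.modify (pvKey s) 0 f) d).getD k 0
      = if k ∈ l.map pvKey then f (d.getD k 0) else d.getD k 0 := by
  induction l generalizing d with
  | nil => simp
  | cons s rest ih =>
    have hd' : ∀ k', P ((d.modify (pvKey s) 0 f).getD k' 0) := by
      intro k'
      rw [PySem.Dict.getD_modify]
      split_ifs
      · exact hPf _ (hd _)
      · exact hd _
    simp only [List.foldl_cons, List.map_cons, List.mem_cons]
    rw [ih _ hd', PySem.Dict.getD_modify]
    by_cases h1 : k ∈ rest.map pvKey <;> by_cases h2 : k = pvKey s
    · rw [if_pos h1, if_pos h2, if_pos (Or.inr h1), h2]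
      exact hidem _ (hd _)
    · rw [if_pos h1, if_neg h2, if_pos (Or.inr h1)]
    · rw [if_neg h1, if_pos h2, if_pos (Or.inl h2), h2]
    · rw [if_neg h1, if_neg h2, if_neg (by tauto)]

theorem pv_count_fold (vals : List Int) (a b : Int) :
    vals.foldl (fun p f => if f = 3 then (p.1 + 1, p.2) else (p.1, p.2 + 1)) (a, b)
      = (a + (vals.countP (fun v => v == 3) : Int),
         b + (vals.countP (fun v => !(v == 3)) : Int)) := by
  induction vals generalizing a b with
  | nil => simp
  | cons v rest ih =>
    by_cases hv : v = 3 <;>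
      simp [hv, ih] <;> ring

-- ===== VERDICT (by name: the statement is the Claim_ definition above) =====
theorem uniqe_apps_spec : Claim_equal_uniqe_apps := by
  intro kfc ws _ _
  unfold Spec_uniqe_apps uniqe_apps uniqe_apps_alt
  by_cases hguard : ws.length = 0 ∨ kfc.length = 0
  · have hnil : ws = [] ∨ kfc = [] := by
      rcases hguard with h | h
      · exact Or.inl (List.length_eq_zero_iff.mp h)
      · exact Or.inr (List.length_eq_zero_iff.mp h)
    simp [hnil]
  · simp only [hguard, if_false]
    set K := kfc.map pvKey with hK
    set W := ws.map pvKey with hW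
    set d1 := kfc.foldl (fun d s => d.modify (pvKey s) 0 (fun v => PySem.Int.bor v 1)) PySem.Dict.empty with hd1
    set d2 := ws.foldl (fun d s => d.modify (pvKey s) 0 (fun v => PySem.Int.bor v 2)) d1 with hd2
    -- value of d1 at any key
    have hval1 : ∀ k, d1.getD k 0 = if k ∈ K then 1 else 0 := by
      intro k
      rw [hd1, pv_getD_foldl_modify (fun v => PySem.Int.bor v 1) (fun v => v = 0 ∨ v = 1)
        (by rintro v (rfl | rfl) <;> simp <;> decide)
        (by rintro v (rfl | rfl) <;> decide)
        kfc PySem.Dict.empty (by intro k; rw [PySem.Dict.getD_empty]; left; rfl) k]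
      rw [PySem.Dict.getD_empty]
      split_ifs <;> decide
    have hval2 : ∀ k, d2.getD k 0
        = if k ∈ W then PySem.Int.bor (if k ∈ K then 1 else 0) 2 else (if k ∈ K then 1 else 0) := by
      intro k
      rw [hd2, pv_getD_foldl_modify (fun v => PySem.Int.bor v 2)
        (fun v => v = 0 ∨ v = 1 ∨ v = 2 ∨ v = 3)
        (by rintro v (rfl | rfl | rfl | rfl) <;> decide)
        (by rintro v (rfl | rfl | rfl | rfl) <;> decide)
        ws d1 (by intro k; rw [hval1]; split_ifs <;> simp) k]
      rw [hval1]
    have hkeys : d2.keys = PySem.Set.ofList (K ++ W) := by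
      rw [hd2, hd1, PySem.Dict.keys_foldl_modify_key, PySem.Dict.keys_foldl_modify_key,
        PySem.Dict.keys_empty, PySem.Set.update_nil_left, PySem.Set.ofList_append]
    have hnodup : d2.keys.Nodup := by rw [hkeys]; exact PySem.Set.nodup_ofList _
    have hvalues : d2.values = (PySem.Set.ofList (K ++ W)).map (fun k => d2.getD k 0) := by
      rw [← hkeys]; exact PySem.Dict.values_eq_map_keys d2 hnodup 0
    rw [hvalues, pv_count_fold, List.countP_map, List.countP_map]
    -- reduce both counts to countP over ofList (K ++ W)
    have hsplit : PySem.Set.ofList (K ++ W)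
        = PySem.Set.ofList K ++ (PySem.Set.ofList W).filter (fun y => !(PySem.Set.ofList K).contains y) := by
      rw [PySem.Set.ofList_append, PySem.Set.update_eq_append_filter]
    -- the pointwise value of the classifier
    have hflag : ∀ k, ((fun v => v == 3) ∘ fun k => d2.getD k 0) k
        = (decide (k ∈ K) && decide (k ∈ W)) := by
      intro k
      simp only [Function.comp, hval2]
      by_cases h1 : k ∈ K <;> by_cases h2 : k ∈ W <;> simp [h1, h2] <;> decide
    have hflag' : ∀ k, ((fun v => !(v == 3)) ∘ fun k => d2.getD k 0) k
        = !(decide (k ∈ K) && decide (k ∈ W)) := by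
      intro k
      simp only [Function.comp]
      have := hflag k
      simp only [Function.comp] at this
      rw [this]
    have hcnt1 : List.countP ((fun v => v == 3) ∘ fun k => d2.getD k 0) (PySem.Set.ofList (K ++ W))
        = List.countP (fun k => decide (k ∈ K) && decide (k ∈ W)) (PySem.Set.ofList (K ++ W)) :=
      List.countP_congr (fun k _ => by rw [hflag k])
    have hcnt2 : List.countP ((fun v => !(v == 3)) ∘ fun k => d2.getD k 0) (PySem.Set.ofList (K ++ W))
        = List.countP (fun k => !(decide (k ∈ K) && decide (k ∈ W))) (PySem.Set.ofList (K ++ W)) :=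
      List.countP_congr (fun k _ => by rw [hflag' k])
    rw [hcnt1, hcnt2]
    simp only [zero_add]
    refine Prod.ext ?_ ?_
    · -- shared count
      show PySem.Set.len (PySem.Set.inter (PySem.Set.ofList K) (PySem.Set.ofList W)) = _
      rw [hsplit, List.countP_append]
      have h2 : List.countP (fun k => decide (k ∈ K) && decide (k ∈ W))
          ((PySem.Set.ofList W).filter (fun y => !(PySem.Set.ofList K).contains y)) = 0 := by
        rw [List.countP_eq_zero]
        intro k hk
        have hkK : k ∉ K := by
          have hcf := (List.mem_filter.mp hk).2
          intro hmem
          have hct : (PySem.Set.ofList K).contains k = true :=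
            (PySem.Set.contains_iff _ _).mpr ((PySem.Set.mem_ofList _ _).mpr hmem)
          simp at hcf
          exact hcf hmem
        simp [hkK]
      rw [h2, Nat.add_zero]
      have : List.countP (fun k => decide (k ∈ K) && decide (k ∈ W)) (PySem.Set.ofList K)
          = List.countP (fun k => (PySem.Set.ofList W).contains k) (PySem.Set.ofList K) := by
        apply List.countP_congr
        intro k hk
        have hkK : k ∈ K := (PySem.Set.mem_ofList _ _).mp hk
        simp [hkK]
      rw [this]
      simp only [PySem.Set.len, PySem.Set.inter, ← List.countP_eq_length_filter]
    · -- distinct count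
      show PySem.Set.len (PySem.Set.diff (PySem.Set.ofList (K ++ W)) _) = _
      have hcont : ∀ k, (PySem.Set.inter (PySem.Set.ofList K) (PySem.Set.ofList W)).contains k
          = (decide (k ∈ K) && decide (k ∈ W)) := by
        intro k
        by_cases h : k ∈ K ∧ k ∈ W
        · have : k ∈ PySem.Set.inter (PySem.Set.ofList K) (PySem.Set.ofList W) :=
            (PySem.Set.mem_inter _ _ _).mpr ⟨(PySem.Set.mem_ofList _ _).mpr h.1,
              (PySem.Set.mem_ofList _ _).mpr h.2⟩
          simp [h.1, h.2, this]
        · have hnm : k ∉ PySem.Set.inter (PySem.Set.ofList K) (PySem.Set.ofList W) := by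
            intro hmem
            exact h ⟨(PySem.Set.mem_ofList _ _).mp ((PySem.Set.mem_inter _ _ _).mp hmem).1,
              (PySem.Set.mem_ofList _ _).mp ((PySem.Set.mem_inter _ _ _).mp hmem).2⟩
          have hc : (PySem.Set.inter (PySem.Set.ofList K) (PySem.Set.ofList W)).contains k = false := by
            rw [Bool.eq_false_iff]
            intro hc
            exact hnm ((PySem.Set.contains_iff _ _).mp hc)
          rw [hc]
          rcases not_and_or.mp h with h' | h' <;> simp [h']
      simp only [PySem.Set.len, PySem.Set.diff, ← List.countP_eq_length_filter]
      congr 1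
      apply List.countP_congr
      intro k _
      rw [hcont k]
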